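-- pv_equiv track=rewrite | github.com/eliottcassidy2000/math | 04-computation/drt_contraction_tournament.py | count_tc_edges
-- ===== SOURCE A (Python) =====
-- def count_tc_edges(T):
--     """Count edges whose contraction gives a tournament."""
--     n = len(T)
--     count = 0
--     total = 0
--     for u in range(n):
--         for v in range(n):
--             if u == v or not T[u][v]:
--                 continue
--             # Check: do u and v have same out-nbrs on V\{u,v}?
--             same = all(T[u][x] == T[v][x] for x in range(n) if x != u and x != v)
--             if same:
--                 count += 1
--             total += 1
--     return count, total
-- ===== SOURCE B (Python) =====
-- def count_tc_edges(T):
--     """Count edges whose contraction gives a tournament.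
--
--     Different algorithm: a column-major first pass builds a disagreement
--     counter per unordered row pair (diff[(u,v)] = number of columns where
--     rows u and v differ), then a second pass decides each pair purely
--     arithmetically: the rows agree outside {u,v} iff the counter minus the
--     disagreements at positions u and v is zero.  No per-pair column scan
--     remains in the second pass.
--     """
--     n = len(T)
--     diff = {}
--     for x in range(n):
--         for u in range(n):
--             for v in range(u + 1, n):
--                 if T[u][x] != T[v][x]:
--                     diff[(u, v)] = diff.get((u, v), 0) + 1
--     count = 0
--     total = 0
--     for u in range(n):
--         ru = T[u]
--         for v in range(u + 1, n):
--             rv = T[v]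
--             d = diff.get((u, v), 0)
--             if ru[u] != rv[u]:
--                 d -= 1
--             if ru[v] != rv[v]:
--                 d -= 1
--             e = (1 if ru[v] else 0) + (1 if rv[u] else 0)
--             total += e
--             if d == 0:
--                 count += e
--     return count, total
-- ===== Notes on version B (the rewrite author's own statement) =====
-- stated objective: alternative
-- what changed: B replaces A's per-pair inner column scan by a two-phase algorithm: a column-major pass builds a dict counting, per unordered row pair, the columns where the rows differ, and a second pass decides each edge purely arithmetically (counter minus the disagreements at positions u and v equals zero), so no per-pair column scan remains.
-- outside the precondition, e.g. on count_tc_edges([[0, 1], [0]]): A returns (1, 1), B raises IndexError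
import Mathlib
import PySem

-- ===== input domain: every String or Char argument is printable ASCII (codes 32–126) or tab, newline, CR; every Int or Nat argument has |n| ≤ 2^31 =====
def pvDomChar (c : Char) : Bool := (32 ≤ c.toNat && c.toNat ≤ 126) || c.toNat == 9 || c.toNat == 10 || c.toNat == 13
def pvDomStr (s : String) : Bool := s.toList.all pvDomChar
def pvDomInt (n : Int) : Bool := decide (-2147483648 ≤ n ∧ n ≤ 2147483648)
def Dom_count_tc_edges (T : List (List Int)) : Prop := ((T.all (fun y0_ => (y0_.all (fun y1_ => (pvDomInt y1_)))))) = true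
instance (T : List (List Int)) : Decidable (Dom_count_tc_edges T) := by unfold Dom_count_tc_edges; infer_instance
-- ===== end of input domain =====

-- B replaces A's per-pair inner column scan by a two-phase algorithm: a column-major pass builds a
-- disagreement counter per unordered row pair (a dict), and a second pass decides each edge
-- arithmetically from the counter; an alternative of the same asymptotic cost (not claimed faster).

-- ===== PORT A =====
def count_tc_edges (T : List (List Int)) : Int × Int :=
  let n : Int := T.length
  (PySem.List.pyRange 0 n 1).foldl (fun acc u =>
    (PySem.List.pyRange 0 n 1).foldl (fun acc v =>
      if u = v ∨ PySem.List.pyGetD (PySem.List.pyGetD T u []) v 0 = 0 then acc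
      else
        let same := ((PySem.List.pyRange 0 n 1).filter (fun x => x != u && x != v)).all
          (fun x => PySem.List.pyGetD (PySem.List.pyGetD T u []) x 0 ==
                    PySem.List.pyGetD (PySem.List.pyGetD T v []) x 0)
        ((if same then acc.1 + 1 else acc.1), acc.2 + 1)) acc) (0, 0)

-- ===== PORT B =====
def count_tc_edges_alt (T : List (List Int)) : Int × Int :=
  let n : Int := T.length
  -- phase 1: diff[(u,v)] = number of columns x < n where rows u and v differ
  let diff : PySem.Dict (Int × Int) Int :=
    (PySem.List.pyRange 0 n 1).foldl (fun d x =>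
      (PySem.List.pyRange 0 n 1).foldl (fun d u =>
        (PySem.List.pyRange (u + 1) n 1).foldl (fun d v =>
          if PySem.List.pyGetD (PySem.List.pyGetD T u []) x 0 ≠
             PySem.List.pyGetD (PySem.List.pyGetD T v []) x 0
          then d.insert (u, v) (d.getD (u, v) 0 + 1) else d) d) d) PySem.Dict.empty
  -- phase 2: arithmetic decision per unordered pair
  (PySem.List.pyRange 0 n 1).foldl (fun acc u =>
    let ru := PySem.List.pyGetD T u []
    (PySem.List.pyRange (u + 1) n 1).foldl (fun acc v =>
      let rv := PySem.List.pyGetD T v []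
      let d0 := diff.getD (u, v) 0
      let d1 := if PySem.List.pyGetD ru u 0 ≠ PySem.List.pyGetD rv u 0 then d0 - 1 else d0
      let d2 := if PySem.List.pyGetD ru v 0 ≠ PySem.List.pyGetD rv v 0 then d1 - 1 else d1
      let e : Int := (if PySem.List.pyGetD ru v 0 ≠ 0 then 1 else 0) +
                     (if PySem.List.pyGetD rv u 0 ≠ 0 then 1 else 0)
      ((if d2 = 0 then acc.1 + e else acc.1), acc.2 + e)) acc) (0, 0)

-- ===== PRECONDITION & SPEC =====
-- Pre_ excludes ragged inputs (a row shorter than len(T)), outside the square-matrix domain: there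
-- A raises IndexError or returns a value depending on which entries happen to be reachable, and B raises.
def Pre_count_tc_edges (T : List (List Int)) : Prop :=
  ∀ row ∈ T, T.length ≤ row.length
instance (T : List (List Int)) : Decidable (Pre_count_tc_edges T) := by
  unfold Pre_count_tc_edges; infer_instance

def pvWitness_count_tc_edges : List (List Int) := [[0, 1], [0, 0]]

def Spec_count_tc_edges (T : List (List Int)) (out : Int × Int) : Prop := out = count_tc_edges_alt T
instance (T : List (List Int)) (out : Int × Int) : Decidable (Spec_count_tc_edges T out) := by unfold Spec_count_tc_edges; infer_instance

-- ===== CLAIM (what is proved, stated in full; the proofs are below) =====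
def Claim_equal_count_tc_edges : Prop := ∀ (T : List (List Int)), Dom_count_tc_edges T → Pre_count_tc_edges T → Spec_count_tc_edges T (count_tc_edges T)

-- ===== LEMMAS AND PROOFS =====

-- entry T[u][x]
def pvE (T : List (List Int)) (u x : Int) : Int :=
  PySem.List.pyGetD (PySem.List.pyGetD T u []) x 0

-- A's "same" test and A's per-(u,v) contributions
def pvSameA (T : List (List Int)) (n u v : Int) : Bool :=
  ((PySem.List.pyRange 0 n 1).filter (fun x => x != u && x != v)).all
    (fun x => pvE T u x == pvE T v x)

def pvCA (T : List (List Int)) (n u v : Int) : Int :=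
  if u = v ∨ pvE T u v = 0 then 0 else if pvSameA T n u v then 1 else 0

def pvTA (T : List (List Int)) (_n u v : Int) : Int :=
  if u = v ∨ pvE T u v = 0 then 0 else 1

-- B's key stream (phase 1 flattened), counter value, arithmetic test, and per-pair contributions
def pvDiffAt (T : List (List Int)) (u v x : Int) : Bool := pvE T u x != pvE T v x

def pvKeys (T : List (List Int)) (n : Int) : List (Int × Int) :=
  (PySem.List.pyRange 0 n 1).flatMap (fun x =>
    (PySem.List.pyRange 0 n 1).flatMap (fun u =>
      (((PySem.List.pyRange (u + 1) n 1).filter (fun v => pvDiffAt T u v x)).map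
        (fun v => ((u, v) : Int × Int)))))

def pvDB (T : List (List Int)) (n u v : Int) : Int :=
  let d0 : Int := ((pvKeys T n).count (u, v) : Int)
  let d1 := if pvE T u u ≠ pvE T v u then d0 - 1 else d0
  if pvE T u v ≠ pvE T v v then d1 - 1 else d1

def pvEdges (T : List (List Int)) (u v : Int) : Int :=
  (if pvE T u v ≠ 0 then 1 else 0) + (if pvE T v u ≠ 0 then 1 else 0)

def pvCB (T : List (List Int)) (n u v : Int) : Int :=
  if pvDB T n u v = 0 then pvEdges T u v else 0

-- additive pair fold
theorem pvFoldPair (l : List Int) (f g : Int → Int) (a b : Int) :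
    l.foldl (fun acc x => (acc.1 + f x, acc.2 + g x)) (a, b)
      = (a + (l.map f).sum, b + (l.map g).sum) := by
  induction l generalizing a b with
  | nil => simp
  | cons h t ih => simp [List.foldl_cons, ih]; constructor <;> ring

-- fold with a skip guard = fold over the filtered list (any state type)
theorem pvFoldIf {α β : Type} (p : α → Bool) (g : β → α → β) (l : List α) (d : β) :
    l.foldl (fun d x => if p x then g d x else d) d = (l.filter p).foldl g d := by
  induction l generalizing d with
  | nil => rfl
  | cons h t ih => by_cases hp : p h <;> simp [hp, ih]

-- pointwise-equal step functions fold alike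
theorem pvFoldlCongr {α β : Type} (l : List α) (f g : β → α → β) (d : β)
    (h : ∀ b x, x ∈ l → f b x = g b x) : l.foldl f d = l.foldl g d := by
  induction l generalizing d with
  | nil => rfl
  | cons a t ih =>
    rw [List.foldl_cons, List.foldl_cons, h d a (List.mem_cons_self)]
    exact ih _ (fun b x hx => h b x (List.mem_cons_of_mem a hx))

-- nested fold = fold over the flatMap (any state type)
theorem pvFoldFlat {α β γ : Type} (h : α → List γ) (g : β → γ → β) (l : List α) (d : β) :
    l.foldl (fun d x => (h x).foldl g d) d = (l.flatMap h).foldl g d := by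
  induction l generalizing d with
  | nil => rfl
  | cons a t ih => simp [List.flatMap_cons, List.foldl_append, ih]

-- the unordered ranges samples: count of (u0,v0) in one column's key block
theorem pvCount_block (T : List (List Int)) (n u0 v0 x : Int)
    (hu0 : 0 ≤ u0) (huv : u0 < v0) (hv0 : v0 < n) :
    ((PySem.List.pyRange 0 n 1).flatMap (fun u =>
        (((PySem.List.pyRange (u + 1) n 1).filter (fun v => pvDiffAt T u v x)).map
          (fun v => ((u, v) : Int × Int))))).count (u0, v0)
      = if pvDiffAt T u0 v0 x then 1 else 0 := by
  rw [List.count_flatMap]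
  have hsplit : PySem.List.pyRange 0 n 1
      = PySem.List.pyRange 0 u0 1 ++ [u0] ++ PySem.List.pyRange (u0 + 1) n 1 := by
    rw [List.append_assoc, ← PySem.List.pyRange_one_singleton,
      ← PySem.List.pyRange_one_append u0 (u0 + 1) n (by omega) (by omega),
      ← PySem.List.pyRange_one_append 0 u0 n (by omega) (by omega)]
  have hzero : ∀ u : Int, u ≠ u0 →
      (Function.comp (List.count ((u0, v0) : Int × Int))
        (fun u => (((PySem.List.pyRange (u + 1) n 1).filter (fun v => pvDiffAt T u v x)).map
          (fun v => ((u, v) : Int × Int))))) u = 0 := by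
    intro u hu
    simp only [Function.comp_apply, List.count_eq_zero, List.mem_map]
    rintro ⟨v, -, hv⟩
    exact hu (congrArg Prod.fst hv)
  have hat : (Function.comp (List.count ((u0, v0) : Int × Int))
        (fun u => (((PySem.List.pyRange (u + 1) n 1).filter (fun v => pvDiffAt T u v x)).map
          (fun v => ((u, v) : Int × Int))))) u0
      = if pvDiffAt T u0 v0 x then 1 else 0 := by
    simp only [Function.comp_apply]
    by_cases hd : pvDiffAt T u0 v0 x
    · rw [if_pos hd]
      have hmem : v0 ∈ (PySem.List.pyRange (u0 + 1) n 1).filter (fun v => pvDiffAt T u0 v x) := by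
        rw [List.mem_filter, PySem.List.mem_pyRange_one]
        exact ⟨⟨by omega, hv0⟩, hd⟩
      have hnd : ((PySem.List.pyRange (u0 + 1) n 1).filter
          (fun v => pvDiffAt T u0 v x)).Nodup :=
        (PySem.List.nodup_pyRange_one _ _).filter _
      have : (((PySem.List.pyRange (u0 + 1) n 1).filter (fun v => pvDiffAt T u0 v x)).map
          (fun v => ((u0, v) : Int × Int))).Nodup := by
        refine hnd.map ?_
        intro a b h
        exact congrArg Prod.snd h
      rw [List.count_eq_one_of_mem this (List.mem_map_of_mem hmem)]
    · rw [if_neg hd]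
      rw [List.count_eq_zero]
      rintro h
      rcases List.mem_map.1 h with ⟨v, hv, he⟩
      have hveq : v = v0 := congrArg Prod.snd he
      subst hveq
      exact hd (List.mem_filter.1 hv).2
  rw [hsplit]
  simp only [List.map_append, List.sum_append, List.map_cons, List.map_nil, List.sum_cons,
    List.sum_nil, add_zero, hat]
  have h1 : ((PySem.List.pyRange 0 u0 1).map (Function.comp (List.count ((u0, v0) : Int × Int))
      (fun u => (((PySem.List.pyRange (u + 1) n 1).filter (fun v => pvDiffAt T u v x)).map
        (fun v => ((u, v) : Int × Int)))))).sum = 0 := by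
    apply List.sum_eq_zero
    intro y hy
    rcases List.mem_map.1 hy with ⟨u, hu, rfl⟩
    rw [PySem.List.mem_pyRange_one] at hu
    exact hzero u (by omega)
  have h2 : ((PySem.List.pyRange (u0 + 1) n 1).map (Function.comp (List.count ((u0, v0) : Int × Int))
      (fun u => (((PySem.List.pyRange (u + 1) n 1).filter (fun v => pvDiffAt T u v x)).map
        (fun v => ((u, v) : Int × Int)))))).sum = 0 := by
    apply List.sum_eq_zero
    intro y hy
    rcases List.mem_map.1 hy with ⟨u, hu, rfl⟩
    rw [PySem.List.mem_pyRange_one] at hu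
    exact hzero u (by omega)
  rw [h1, h2]
  omega

-- count of (u0,v0) over the whole key stream = number of differing columns
theorem pvCount_keys (T : List (List Int)) (n u0 v0 : Int)
    (hu0 : 0 ≤ u0) (huv : u0 < v0) (hv0 : v0 < n) :
    (pvKeys T n).count (u0, v0)
      = (PySem.List.pyRange 0 n 1).countP (fun x => pvDiffAt T u0 v0 x) := by
  rw [pvKeys, List.count_flatMap]
  have : ((PySem.List.pyRange 0 n 1).map (Function.comp (List.count ((u0, v0) : Int × Int))
      (fun x => (PySem.List.pyRange 0 n 1).flatMap (fun u =>
        (((PySem.List.pyRange (u + 1) n 1).filter (fun v => pvDiffAt T u v x)).map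
          (fun v => ((u, v) : Int × Int))))))).sum
      = ((PySem.List.pyRange 0 n 1).map
          (fun x => if pvDiffAt T u0 v0 x then 1 else 0)).sum := by
    congr 1
    apply List.map_congr_left
    intro x _
    exact pvCount_block T n u0 v0 x hu0 huv hv0
  rw [this]
  induction (PySem.List.pyRange 0 n 1) with
  | nil => rfl
  | cons h t ih => by_cases hd : pvDiffAt T u0 v0 h <;> simp [hd, ih] <;> omega

-- A's "same" test as a countP statement
theorem pvSameA_iff_countP (T : List (List Int)) (n u v : Int) :
    pvSameA T n u v = true
      ↔ ((PySem.List.pyRange 0 n 1).filter (fun x => x != u && x != v)).countP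
          (fun x => pvDiffAt T u v x) = 0 := by
  rw [pvSameA, List.all_eq_true, List.countP_eq_zero]
  constructor
  · intro h x hx
    have := h x hx
    simp only [pvDiffAt, bne, beq_iff_eq] at this ⊢
    simp [this]
  · intro h x hx
    have := h x hx
    simp only [pvDiffAt, bne] at this
    simpa using this

-- splitting the full-range disagreement count at u and v (u < v, both in range)
theorem pvCount_split (T : List (List Int)) (n u v : Int)
    (hu : 0 ≤ u) (huv : u < v) (hv : v < n) :
    (PySem.List.pyRange 0 n 1).countP (fun x => pvDiffAt T u v x)
      = ((PySem.List.pyRange 0 n 1).filter (fun x => x != u && x != v)).countP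
          (fun x => pvDiffAt T u v x)
        + (if pvDiffAt T u v u then 1 else 0) + (if pvDiffAt T u v v then 1 else 0) := by
  have hsplit : PySem.List.pyRange 0 n 1
      = ((PySem.List.pyRange 0 u 1 ++ [u]) ++ PySem.List.pyRange (u + 1) v 1 ++ [v])
        ++ PySem.List.pyRange (v + 1) n 1 := by
    rw [← PySem.List.pyRange_one_singleton (a := u), ← PySem.List.pyRange_one_singleton (a := v)]
    rw [← PySem.List.pyRange_one_append 0 u (u + 1) (by omega) (by omega)]
    rw [← PySem.List.pyRange_one_append 0 (u + 1) v (by omega) (by omega)]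
    rw [← PySem.List.pyRange_one_append 0 v (v + 1) (by omega) (by omega)]
    rw [← PySem.List.pyRange_one_append 0 (v + 1) n (by omega) (by omega)]
  have hkeep : ∀ l : List Int, (∀ x ∈ l, x ≠ u ∧ x ≠ v) →
      l.filter (fun x => x != u && x != v) = l := by
    intro l hl
    apply List.filter_eq_self.2
    intro x hx
    have := hl x hx
    simp [bne, this.1, this.2]
  have m1 : ∀ x ∈ PySem.List.pyRange 0 u 1, x ≠ u ∧ x ≠ v := by
    intro x hx; rw [PySem.List.mem_pyRange_one] at hx; omega
  have m2 : ∀ x ∈ PySem.List.pyRange (u + 1) v 1, x ≠ u ∧ x ≠ v := by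
    intro x hx; rw [PySem.List.mem_pyRange_one] at hx; omega
  have m3 : ∀ x ∈ PySem.List.pyRange (v + 1) n 1, x ≠ u ∧ x ≠ v := by
    intro x hx; rw [PySem.List.mem_pyRange_one] at hx; omega
  rw [hsplit]
  simp only [List.filter_append, List.countP_append, hkeep _ m1, hkeep _ m2, hkeep _ m3]
  have hu' : List.filter (fun x => x != u && x != v) [u] = [] := by simp
  have hv' : List.filter (fun x => x != u && x != v) [v] = [] := by
    simp
  rw [hu', hv']
  simp only [List.countP_nil, List.countP_cons, List.countP_nil]
  by_cases d1 : pvDiffAt T u v u <;> by_cases d2 : pvDiffAt T u v v <;>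
    simp [d1, d2] <;> omega

-- B's arithmetic test agrees with A's "same" test (u < v, both in range)
theorem pvDB_iff_same (T : List (List Int)) (n u v : Int)
    (hu : 0 ≤ u) (huv : u < v) (hv : v < n) :
    (pvDB T n u v = 0) ↔ pvSameA T n u v = true := by
  rw [pvDB, pvCount_keys T n u v hu huv hv, pvSameA_iff_countP, pvCount_split T n u v hu huv hv]
  have hdu : (pvE T u u ≠ pvE T v u) ↔ pvDiffAt T u v u = true := by
    simp [pvDiffAt, bne]
  have hdv : (pvE T u v ≠ pvE T v v) ↔ pvDiffAt T u v v = true := by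
    simp [pvDiffAt, bne]
  by_cases d1 : pvDiffAt T u v u = true <;> by_cases d2 : pvDiffAt T u v v = true <;>
    simp only [if_pos, if_neg, d1, d2, hdu, hdv, Bool.not_eq_true] <;>
    push_cast <;> omega

theorem pvSameA_symm (T : List (List Int)) (n u v : Int) :
    pvSameA T n u v = pvSameA T n v u := by
  rw [pvSameA, pvSameA]
  have : ∀ l : List Int, l.filter (fun x => x != u && x != v)
      = l.filter (fun x => x != v && x != u) := by
    intro l; apply List.filter_congr; intro x _; rw [Bool.and_comm]
  rw [this]
  apply List.all_congr rfl
  intro x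
  rw [Bool.beq_comm]

-- bridging: B's pair contribution = A's (u,v) + A's (v,u) contribution, for bounded u < v
theorem pvCB_eq (T : List (List Int)) (n u v : Int)
    (hu : 0 ≤ u) (huv : u < v) (hv : v < n) :
    pvCB T n u v = pvCA T n u v + pvCA T n v u := by
  have hs := pvDB_iff_same T n u v hu huv hv
  have hsym := pvSameA_symm T n u v
  have hne : u ≠ v := by omega
  unfold pvCB pvCA pvEdges
  by_cases hd : pvDB T n u v = 0
  · have hsame : pvSameA T n u v = true := hs.1 hd
    by_cases h1 : pvE T u v = 0 <;> by_cases h2 : pvE T v u = 0 <;>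
      simp [hd, h1, h2, hne, Ne.symm hne, hsame, ← hsym]
  · have hsame : ¬ pvSameA T n u v = true := fun h => hd (hs.2 h)
    by_cases h1 : pvE T u v = 0 <;> by_cases h2 : pvE T v u = 0 <;>
      simp [hd, h1, h2, hne, Ne.symm hne, hsame, ← hsym]

theorem pvEdges_eq (T : List (List Int)) (n u v : Int) (huv : u ≠ v) :
    pvEdges T u v = pvTA T n u v + pvTA T n v u := by
  unfold pvEdges pvTA
  by_cases h1 : pvE T u v = 0 <;> by_cases h2 : pvE T v u = 0 <;>
    simp [h1, h2, huv, Ne.symm huv]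

-- square-sum pairing: sum over ordered pairs = sum over unordered pairs of both orientations
theorem pvPairing (f : Int → Int → Int) (hdiag : ∀ u, f u u = 0) (N : Nat) :
    ((PySem.List.pyRange 0 (N : Int) 1).map
        (fun u => ((PySem.List.pyRange 0 (N : Int) 1).map (fun v => f u v)).sum)).sum
      = ((PySem.List.pyRange 0 (N : Int) 1).map
        (fun u => ((PySem.List.pyRange (u + 1) (N : Int) 1).map
            (fun v => f u v + f v u)).sum)).sum := by
  induction N with
  | zero => simp
  | succ N ih =>
    push_cast
    rw [PySem.List.pyRange_one_succ_right (by positivity)]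
    simp only [List.map_append, List.sum_append, List.map_cons, List.map_nil,
      List.sum_cons, List.sum_nil, add_zero]
    have hR : ((PySem.List.pyRange 0 (N : Int) 1).map
          (fun u => ((PySem.List.pyRange (u + 1) ((N : Int) + 1) 1).map
            (fun v => f u v + f v u)).sum))
        = ((PySem.List.pyRange 0 (N : Int) 1).map
          (fun u => ((PySem.List.pyRange (u + 1) (N : Int) 1).map
            (fun v => f u v + f v u)).sum + (f u (N : Int) + f (N : Int) u))) := by
      apply List.map_congr_left
      intro u hu
      rw [PySem.List.mem_pyRange_one] at hu
      rw [PySem.List.pyRange_one_succ_right (by omega)]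
      simp
    rw [hR, show PySem.List.pyRange ((N : Int) + 1) ((N : Int) + 1) 1 = [] from
        PySem.List.pyRange_one_eq_nil le_rfl]
    rw [PySem.List.sum_map_add_int (PySem.List.pyRange 0 (N : Int) 1)
        (fun u => ((PySem.List.pyRange 0 (N : Int) 1).map (fun v => f u v)).sum)
        (fun u => f u (N : Int)),
      PySem.List.sum_map_add_int (PySem.List.pyRange 0 (N : Int) 1)
        (fun u => ((PySem.List.pyRange (u + 1) (N : Int) 1).map
          (fun v => f u v + f v u)).sum)
        (fun u => f u (N : Int) + f (N : Int) u),
      PySem.List.sum_map_add_int (PySem.List.pyRange 0 (N : Int) 1)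
        (fun u => f u (N : Int)) (fun u => f (N : Int) u),
      ih, hdiag]
    simp
    ring

-- A's fold in closed form
theorem pvA_closed (T : List (List Int)) :
    count_tc_edges T
      = (((PySem.List.pyRange 0 (T.length : Int) 1).map
            (fun u => ((PySem.List.pyRange 0 (T.length : Int) 1).map
              (fun v => pvCA T (T.length : Int) u v)).sum)).sum,
         ((PySem.List.pyRange 0 (T.length : Int) 1).map
            (fun u => ((PySem.List.pyRange 0 (T.length : Int) 1).map
              (fun v => pvTA T (T.length : Int) u v)).sum)).sum) := by
  have hstep : ∀ u : Int, (fun (acc : Int × Int) (v : Int) =>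
      if u = v ∨ PySem.List.pyGetD (PySem.List.pyGetD T u []) v 0 = 0 then acc
      else
        ((if ((PySem.List.pyRange 0 (T.length : Int) 1).filter (fun x => x != u && x != v)).all
            (fun x => PySem.List.pyGetD (PySem.List.pyGetD T u []) x 0 ==
                      PySem.List.pyGetD (PySem.List.pyGetD T v []) x 0)
          then acc.1 + 1 else acc.1), acc.2 + 1))
      = fun acc v => (acc.1 + pvCA T (T.length : Int) u v, acc.2 + pvTA T (T.length : Int) u v) := by
    intro u
    funext acc v
    simp only [pvCA, pvTA, pvSameA, pvE]
    split_ifs <;> simp_all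
  have hinner : ∀ (u : Int) (acc : Int × Int),
      (PySem.List.pyRange 0 (T.length : Int) 1).foldl
        (fun (acc : Int × Int) (v : Int) =>
          if u = v ∨ PySem.List.pyGetD (PySem.List.pyGetD T u []) v 0 = 0 then acc
          else
            ((if ((PySem.List.pyRange 0 (T.length : Int) 1).filter (fun x => x != u && x != v)).all
                (fun x => PySem.List.pyGetD (PySem.List.pyGetD T u []) x 0 ==
                          PySem.List.pyGetD (PySem.List.pyGetD T v []) x 0)
              then acc.1 + 1 else acc.1), acc.2 + 1)) acc
        = (acc.1 + ((PySem.List.pyRange 0 (T.length : Int) 1).map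
              (fun v => pvCA T (T.length : Int) u v)).sum,
           acc.2 + ((PySem.List.pyRange 0 (T.length : Int) 1).map
              (fun v => pvTA T (T.length : Int) u v)).sum) := by
    intro u acc
    rw [hstep u, ← Prod.mk.eta (p := acc), pvFoldPair]
  have houter : ∀ (l : List Int) (acc : Int × Int),
      l.foldl (fun (acc : Int × Int) (u : Int) =>
        (PySem.List.pyRange 0 (T.length : Int) 1).foldl
          (fun (acc : Int × Int) (v : Int) =>
            if u = v ∨ PySem.List.pyGetD (PySem.List.pyGetD T u []) v 0 = 0 then acc
            else
              ((if ((PySem.List.pyRange 0 (T.length : Int) 1).filter (fun x => x != u && x != v)).all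
                  (fun x => PySem.List.pyGetD (PySem.List.pyGetD T u []) x 0 ==
                            PySem.List.pyGetD (PySem.List.pyGetD T v []) x 0)
                then acc.1 + 1 else acc.1), acc.2 + 1)) acc) acc
        = (acc.1 + (l.map (fun u => ((PySem.List.pyRange 0 (T.length : Int) 1).map
              (fun v => pvCA T (T.length : Int) u v)).sum)).sum,
           acc.2 + (l.map (fun u => ((PySem.List.pyRange 0 (T.length : Int) 1).map
              (fun v => pvTA T (T.length : Int) u v)).sum)).sum) := by
    intro l
    induction l with
    | nil => intro acc; simp
    | cons h t ihl =>
      intro acc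
      rw [List.foldl_cons, hinner h acc, ihl]
      simp only [List.map_cons, List.sum_cons]
      rw [Prod.mk.injEq]
      constructor <;> ring
  exact (houter _ (0, 0)).trans (by simp)

-- B's phase-1 dict is the counter of the flattened key stream
theorem pvDict_eq_counter (T : List (List Int)) (n : Int) :
    (PySem.List.pyRange 0 n 1).foldl (fun d x =>
      (PySem.List.pyRange 0 n 1).foldl (fun d u =>
        (PySem.List.pyRange (u + 1) n 1).foldl (fun d v =>
          if PySem.List.pyGetD (PySem.List.pyGetD T u []) x 0 ≠
             PySem.List.pyGetD (PySem.List.pyGetD T v []) x 0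
          then d.insert (u, v) (d.getD (u, v) 0 + 1) else d) d) d) PySem.Dict.empty
      = PySem.Dict.counter (pvKeys T n) := by
  have hinner : ∀ (x u : Int) (d : PySem.Dict (Int × Int) Int),
      (PySem.List.pyRange (u + 1) n 1).foldl (fun d v =>
          if PySem.List.pyGetD (PySem.List.pyGetD T u []) x 0 ≠
             PySem.List.pyGetD (PySem.List.pyGetD T v []) x 0
          then d.insert (u, v) (d.getD (u, v) 0 + 1) else d) d
        = (((PySem.List.pyRange (u + 1) n 1).filter (fun v => pvDiffAt T u v x)).map
            (fun v => ((u, v) : Int × Int))).foldl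
            (fun d k => d.insert k (d.getD k 0 + 1)) d := by
    intro x u d
    rw [List.foldl_map]
    have hcond : (fun (d : PySem.Dict (Int × Int) Int) (v : Int) =>
        if PySem.List.pyGetD (PySem.List.pyGetD T u []) x 0 ≠
           PySem.List.pyGetD (PySem.List.pyGetD T v []) x 0
        then d.insert (u, v) (d.getD (u, v) 0 + 1) else d)
        = fun d v => if pvDiffAt T u v x
            then d.insert (u, v) (d.getD (u, v) 0 + 1) else d := by
      funext d v
      simp only [pvDiffAt, pvE, bne]
      split_ifs <;> simp_all
    rw [hcond, pvFoldIf]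
  have hmid : ∀ (x : Int) (d : PySem.Dict (Int × Int) Int),
      (PySem.List.pyRange 0 n 1).foldl (fun d u =>
        (PySem.List.pyRange (u + 1) n 1).foldl (fun d v =>
          if PySem.List.pyGetD (PySem.List.pyGetD T u []) x 0 ≠
             PySem.List.pyGetD (PySem.List.pyGetD T v []) x 0
          then d.insert (u, v) (d.getD (u, v) 0 + 1) else d) d) d
        = ((PySem.List.pyRange 0 n 1).flatMap (fun u =>
            (((PySem.List.pyRange (u + 1) n 1).filter (fun v => pvDiffAt T u v x)).map
              (fun v => ((u, v) : Int × Int))))).foldl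
            (fun d k => d.insert k (d.getD k 0 + 1)) d := by
    intro x d
    rw [← pvFoldFlat]
    exact pvFoldlCongr _ _ _ _ (fun d' u _ => hinner x u d')
  calc (PySem.List.pyRange 0 n 1).foldl (fun d x =>
      (PySem.List.pyRange 0 n 1).foldl (fun d u =>
        (PySem.List.pyRange (u + 1) n 1).foldl (fun d v =>
          if PySem.List.pyGetD (PySem.List.pyGetD T u []) x 0 ≠
             PySem.List.pyGetD (PySem.List.pyGetD T v []) x 0
          then d.insert (u, v) (d.getD (u, v) 0 + 1) else d) d) d) PySem.Dict.empty
      = (pvKeys T n).foldl (fun d k => d.insert k (d.getD k 0 + 1)) PySem.Dict.empty := by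
        rw [pvKeys, ← pvFoldFlat]
        exact pvFoldlCongr _ _ _ _ (fun d x _ => hmid x d)
    _ = PySem.Dict.counter (pvKeys T n) :=
        PySem.Dict.foldl_insert_getD_add_one_eq_counter (pvKeys T n)

-- B's fold in closed form
theorem pvB_closed (T : List (List Int)) :
    count_tc_edges_alt T
      = (((PySem.List.pyRange 0 (T.length : Int) 1).map
            (fun u => ((PySem.List.pyRange (u + 1) (T.length : Int) 1).map
              (fun v => pvCB T (T.length : Int) u v)).sum)).sum,
         ((PySem.List.pyRange 0 (T.length : Int) 1).map
            (fun u => ((PySem.List.pyRange (u + 1) (T.length : Int) 1).map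
              (fun v => pvEdges T u v)).sum)).sum) := by
  rw [count_tc_edges_alt]
  simp only [pvDict_eq_counter T (T.length : Int)]
  have hstep : ∀ u : Int, (fun (acc : Int × Int) (v : Int) =>
      ((if (if pvE T u v ≠ pvE T v v then
              (if pvE T u u ≠ pvE T v u then (PySem.Dict.counter (pvKeys T (T.length : Int))).getD (u, v) 0 - 1
               else (PySem.Dict.counter (pvKeys T (T.length : Int))).getD (u, v) 0) - 1
            else (if pvE T u u ≠ pvE T v u then (PySem.Dict.counter (pvKeys T (T.length : Int))).getD (u, v) 0 - 1
               else (PySem.Dict.counter (pvKeys T (T.length : Int))).getD (u, v) 0)) = 0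
        then acc.1 + ((if pvE T u v ≠ 0 then (1 : Int) else 0) + (if pvE T v u ≠ 0 then (1 : Int) else 0))
        else acc.1),
       acc.2 + ((if pvE T u v ≠ 0 then (1 : Int) else 0) + (if pvE T v u ≠ 0 then (1 : Int) else 0))))
      = fun acc v => (acc.1 + pvCB T (T.length : Int) u v, acc.2 + pvEdges T u v) := by
    intro u
    funext acc v
    have hget : (PySem.Dict.counter (pvKeys T (T.length : Int))).getD (u, v) 0
        = ((pvKeys T (T.length : Int)).count (u, v) : Int) :=
      PySem.Dict.getD_counter _ _
    simp only [pvCB, pvDB, pvEdges, hget]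
    split_ifs <;> simp_all
  have hinner : ∀ (u : Int) (acc : Int × Int),
      (PySem.List.pyRange (u + 1) (T.length : Int) 1).foldl
        (fun acc v => (acc.1 + pvCB T (T.length : Int) u v, acc.2 + pvEdges T u v)) acc
        = (acc.1 + ((PySem.List.pyRange (u + 1) (T.length : Int) 1).map
              (fun v => pvCB T (T.length : Int) u v)).sum,
           acc.2 + ((PySem.List.pyRange (u + 1) (T.length : Int) 1).map
              (fun v => pvEdges T u v)).sum) := by
    intro u acc
    rw [← Prod.mk.eta (p := acc), pvFoldPair]
  have houter : ∀ (l : List Int) (acc : Int × Int),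
      l.foldl (fun (acc : Int × Int) (u : Int) =>
        (PySem.List.pyRange (u + 1) (T.length : Int) 1).foldl
          (fun acc v => (acc.1 + pvCB T (T.length : Int) u v, acc.2 + pvEdges T u v)) acc) acc
        = (acc.1 + (l.map (fun u => ((PySem.List.pyRange (u + 1) (T.length : Int) 1).map
              (fun v => pvCB T (T.length : Int) u v)).sum)).sum,
           acc.2 + (l.map (fun u => ((PySem.List.pyRange (u + 1) (T.length : Int) 1).map
              (fun v => pvEdges T u v)).sum)).sum) := by
    intro l
    induction l with
    | nil => intro acc; simp
    | cons h t ihl =>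
      intro acc
      rw [List.foldl_cons, hinner h acc, ihl]
      simp only [List.map_cons, List.sum_cons]
      rw [Prod.mk.injEq]
      constructor <;> ring
  have hfun : (fun (acc : Int × Int) (u : Int) =>
      (PySem.List.pyRange (u + 1) (T.length : Int) 1).foldl
        (fun (acc : Int × Int) (v : Int) =>
          ((if (if PySem.List.pyGetD (PySem.List.pyGetD T u []) v 0 ≠
                    PySem.List.pyGetD (PySem.List.pyGetD T v []) v 0 then
                  (if PySem.List.pyGetD (PySem.List.pyGetD T u []) u 0 ≠
                      PySem.List.pyGetD (PySem.List.pyGetD T v []) u 0 then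
                    (PySem.Dict.counter (pvKeys T (T.length : Int))).getD (u, v) 0 - 1
                   else (PySem.Dict.counter (pvKeys T (T.length : Int))).getD (u, v) 0) - 1
                else (if PySem.List.pyGetD (PySem.List.pyGetD T u []) u 0 ≠
                      PySem.List.pyGetD (PySem.List.pyGetD T v []) u 0 then
                    (PySem.Dict.counter (pvKeys T (T.length : Int))).getD (u, v) 0 - 1
                   else (PySem.Dict.counter (pvKeys T (T.length : Int))).getD (u, v) 0)) = 0
            then acc.1 + ((if PySem.List.pyGetD (PySem.List.pyGetD T u []) v 0 ≠ 0 then (1 : Int) else 0)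
                          + (if PySem.List.pyGetD (PySem.List.pyGetD T v []) u 0 ≠ 0 then (1 : Int) else 0))
            else acc.1),
           acc.2 + ((if PySem.List.pyGetD (PySem.List.pyGetD T u []) v 0 ≠ 0 then (1 : Int) else 0)
                    + (if PySem.List.pyGetD (PySem.List.pyGetD T v []) u 0 ≠ 0 then (1 : Int) else 0)))) acc)
      = (fun (acc : Int × Int) (u : Int) =>
        (PySem.List.pyRange (u + 1) (T.length : Int) 1).foldl
          (fun acc v => (acc.1 + pvCB T (T.length : Int) u v, acc.2 + pvEdges T u v)) acc) := by
    funext acc u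
    rw [show (fun (acc : Int × Int) (v : Int) =>
        ((if (if PySem.List.pyGetD (PySem.List.pyGetD T u []) v 0 ≠
                  PySem.List.pyGetD (PySem.List.pyGetD T v []) v 0 then
                (if PySem.List.pyGetD (PySem.List.pyGetD T u []) u 0 ≠
                    PySem.List.pyGetD (PySem.List.pyGetD T v []) u 0 then
                  (PySem.Dict.counter (pvKeys T (T.length : Int))).getD (u, v) 0 - 1
                 else (PySem.Dict.counter (pvKeys T (T.length : Int))).getD (u, v) 0) - 1
              else (if PySem.List.pyGetD (PySem.List.pyGetD T u []) u 0 ≠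
                    PySem.List.pyGetD (PySem.List.pyGetD T v []) u 0 then
                  (PySem.Dict.counter (pvKeys T (T.length : Int))).getD (u, v) 0 - 1
                 else (PySem.Dict.counter (pvKeys T (T.length : Int))).getD (u, v) 0)) = 0
          then acc.1 + ((if PySem.List.pyGetD (PySem.List.pyGetD T u []) v 0 ≠ 0 then (1 : Int) else 0)
                        + (if PySem.List.pyGetD (PySem.List.pyGetD T v []) u 0 ≠ 0 then (1 : Int) else 0))
          else acc.1),
         acc.2 + ((if PySem.List.pyGetD (PySem.List.pyGetD T u []) v 0 ≠ 0 then (1 : Int) else 0)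
                  + (if PySem.List.pyGetD (PySem.List.pyGetD T v []) u 0 ≠ 0 then (1 : Int) else 0))))
        = fun acc v => (acc.1 + pvCB T (T.length : Int) u v, acc.2 + pvEdges T u v) from hstep u]
  rw [hfun, houter]
  simp

-- ===== VERDICT (by name: the statement is the Claim_ definition above) =====
theorem count_tc_edges_spec : Claim_equal_count_tc_edges := by
  intro T _hDom _hPre
  show count_tc_edges T = count_tc_edges_alt T
  rw [pvA_closed, pvB_closed]
  have hC := pvPairing (pvCA T (T.length : Int)) (fun u => by simp [pvCA]) T.length
  have hT := pvPairing (pvTA T (T.length : Int)) (fun u => by simp [pvTA]) T.length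
  refine Prod.ext ?_ ?_
  · rw [hC]
    simp only
    congr 1
    apply List.map_congr_left; intro u hu
    congr 1
    apply List.map_congr_left; intro v hv
    rw [PySem.List.mem_pyRange_one] at hu hv
    exact (pvCB_eq T (T.length : Int) u v (by omega) (by omega) (by omega)).symm
  · rw [hT]
    simp only
    congr 1
    apply List.map_congr_left; intro u hu
    congr 1
    apply List.map_congr_left; intro v hv
    rw [PySem.List.mem_pyRange_one] at hu hv
    exact (pvEdges_eq T (T.length : Int) u v (by omega)).symm
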